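-- pv_equiv track=rewrite | github.com/iPebz/osrs-merch-dashboard | analysis/opportunity_scorer.py | _calc_news_boost
-- ===== SOURCE A (Python) =====
-- NEWS_BOOST_GAME_UPDATE = 20
--
-- NEWS_BOOST_GE_RISE     = 12
--
-- NEWS_BOOST_MENTIONED   = 8
--
-- def _calc_news_boost(signals):
--     """Small boost applied to non-NEWS items that have weak news signals (1-2 mentions)."""
--     boost = 0
--     label = ""
--     if not signals:
--         return boost, label
--     for sig in signals:
--         stype = sig.get("signal_type", "")
--         if stype == "game_update" and NEWS_BOOST_GAME_UPDATE > boost: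
--             boost = NEWS_BOOST_GAME_UPDATE
--             label = f"update: {sig['article_title'][:35]}"
--         elif stype == "ge_rise" and NEWS_BOOST_GE_RISE > boost:
--             boost = NEWS_BOOST_GE_RISE
--             label = f"GE rising ({sig['article_title']})"
--         elif stype == "mentioned" and NEWS_BOOST_MENTIONED > boost:
--             boost = NEWS_BOOST_MENTIONED
--             label = f"in news: {sig['article_title'][:35]}"
--     return boost, label
-- ===== SOURCE B (Python) =====
-- NEWS_BOOST_GAME_UPDATE = 20
--
-- NEWS_BOOST_GE_RISE     = 12
--
-- NEWS_BOOST_MENTIONED   = 8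
--
-- def _calc_news_boost(signals):
--     """Small boost applied to non-NEWS items that have weak news signals (1-2 mentions)."""
--     if not signals:
--         return 0, ""
--     for stype, boost, fmt in (
--         ("game_update", NEWS_BOOST_GAME_UPDATE, "update: {}"),
--         ("ge_rise", NEWS_BOOST_GE_RISE, "GE rising ({})"),
--         ("mentioned", NEWS_BOOST_MENTIONED, "in news: {}"),
--     ):
--         for sig in signals:
--             if sig.get("signal_type", "") == stype:
--                 title = sig["article_title"]
--                 if stype != "ge_rise":
--                     title = title[:35]
--                 return boost, fmt.format(title)
--     return 0, ""
-- ===== Notes on version B (the rewrite author's own statement) =====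
-- stated objective: alternative
-- what changed: Replaces the single accumulating max-tracking pass with priority-ordered searches: for each signal type in descending boost order, find the first matching signal and return immediately.
import Mathlib
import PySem

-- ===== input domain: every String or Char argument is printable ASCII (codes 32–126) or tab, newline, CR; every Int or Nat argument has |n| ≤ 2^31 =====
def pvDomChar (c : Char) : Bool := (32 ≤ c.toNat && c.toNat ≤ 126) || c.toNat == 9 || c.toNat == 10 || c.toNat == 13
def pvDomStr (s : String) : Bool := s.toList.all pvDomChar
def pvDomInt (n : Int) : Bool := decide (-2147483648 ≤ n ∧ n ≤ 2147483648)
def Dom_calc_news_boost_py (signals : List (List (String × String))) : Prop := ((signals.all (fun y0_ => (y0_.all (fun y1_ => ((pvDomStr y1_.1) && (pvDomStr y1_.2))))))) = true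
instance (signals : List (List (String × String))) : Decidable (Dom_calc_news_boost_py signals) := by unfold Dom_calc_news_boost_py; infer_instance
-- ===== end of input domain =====

-- B replaces A's single accumulating max-tracking pass with priority-ordered searches (first match
-- per signal type, highest boost first, early return); same cost, different decomposition.

-- ===== PORT A =====
-- The loop body of A. Python's raising access sig['article_title'] is ported as getD with "":
-- Pre_calc_news_boost_py guarantees the key is present wherever A's loop reads it, so the values
-- agree on Pre_ (outside Pre_ the Python raises KeyError and nothing is claimed).
def pvStepA (st : Int × String) (sig : List (String × String)) : Int × String :=
  let stype := (PySem.Dict.mk sig).getD "signal_type" ""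
  if stype == "game_update" && decide ((20 : Int) > st.1) then
    (20, "update: " ++ PySem.Str.slice ((PySem.Dict.mk sig).getD "article_title" "") none (some 35))
  else if stype == "ge_rise" && decide ((12 : Int) > st.1) then
    (12, "GE rising (" ++ (PySem.Dict.mk sig).getD "article_title" "" ++ ")")
  else if stype == "mentioned" && decide ((8 : Int) > st.1) then
    (8, "in news: " ++ PySem.Str.slice ((PySem.Dict.mk sig).getD "article_title" "") none (some 35))
  else st

def calc_news_boost_py (signals : List (List (String × String))) : Int × String :=
  if signals.isEmpty then (0, "")
  else signals.foldl pvStepA (0, "")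

-- ===== PORT B =====
-- first signal of the given type (made with dict.get(...,"") like Source B)
def pvFindType (signals : List (List (String × String))) (t : String) :
    Option (List (String × String)) :=
  signals.find? (fun sig => (PySem.Dict.mk sig).getD "signal_type" "" == t)

-- sig['article_title'], as getD "" (present under Pre_, see the comment on pvStepA)
def pvTitleB (sig : List (String × String)) : String :=
  (PySem.Dict.mk sig).getD "article_title" ""

def calc_news_boost_py_alt (signals : List (List (String × String))) : Int × String :=
  if signals.isEmpty then (0, "")
  else
    match pvFindType signals "game_update" with
    | some sig => (20, "update: " ++ PySem.Str.slice (pvTitleB sig) none (some 35))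
    | none =>
      match pvFindType signals "ge_rise" with
      | some sig => (12, "GE rising (" ++ pvTitleB sig ++ ")")
      | none =>
        match pvFindType signals "mentioned" with
        | some sig => (8, "in news: " ++ PySem.Str.slice (pvTitleB sig) none (some 35))
        | none => (0, "")

-- ===== PRECONDITION & SPEC =====
def pvHasTitle (sig : List (String × String)) : Bool :=
  ((PySem.Dict.mk sig).get? "article_title").isSome

-- index of the first signal of the given type; signals.length if there is none
def pvTypeIdx (signals : List (List (String × String))) (t : String) : Nat :=
  (signals.findIdx? (fun sig => (PySem.Dict.mk sig).getD "signal_type" "" == t)).getD signals.length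

-- Pre_ excludes exactly the inputs where Python A raises KeyError: a signal that triggers a branch
-- of A's scan but lacks 'article_title'.  The triggered signals are the first "game_update" signal,
-- the first "ge_rise" signal if it precedes every "game_update", and the first "mentioned" signal
-- if it precedes every "game_update" and every "ge_rise".
def Pre_calc_news_boost_py (signals : List (List (String × String))) : Prop :=
  let gi := pvTypeIdx signals "game_update"
  let ei := pvTypeIdx signals "ge_rise"
  let mi := pvTypeIdx signals "mentioned"
  (gi < signals.length → pvHasTitle (signals.getD gi []) = true)
  ∧ (ei < gi → pvHasTitle (signals.getD ei []) = true)
  ∧ (mi < gi ∧ mi < ei → pvHasTitle (signals.getD mi []) = true)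
instance (signals : List (List (String × String))) : Decidable (Pre_calc_news_boost_py signals) := by
  unfold Pre_calc_news_boost_py; infer_instance

def pvWitness_calc_news_boost_py : (List (List (String × String))) :=
  [[("signal_type", "ge_rise"), ("article_title", "Oldak coup")],
   [("signal_type", "other")]]

def Spec_calc_news_boost_py (signals : List (List (String × String))) (out : Int × String) : Prop := out = calc_news_boost_py_alt signals
instance (signals : List (List (String × String))) (out : Int × String) : Decidable (Spec_calc_news_boost_py signals out) := by unfold Spec_calc_news_boost_py; infer_instance

-- ===== CLAIM (what is proved, stated in full; the proofs are below) =====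
def Claim_equal_calc_news_boost_py : Prop := ∀ (signals : List (List (String × String))), Dom_calc_news_boost_py signals → Pre_calc_news_boost_py signals → Spec_calc_news_boost_py signals (calc_news_boost_py signals)


-- ===== LEMMAS AND PROOFS =====
theorem pvStepA_20 (sig : List (String × String)) (L : String) :
    pvStepA (20, L) sig = (20, L) := by
  simp [pvStepA]

theorem pvFold_20 (l : List (List (String × String))) (L : String) :
    l.foldl pvStepA (20, L) = (20, L) := by
  induction l with
  | nil => rfl
  | cons sig l ih => rw [List.foldl_cons, pvStepA_20]; exact ih

theorem pvFold_12 (l : List (List (String × String))) (L : String) :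
    l.foldl pvStepA (12, L) =
      (match pvFindType l "game_update" with
       | some sig => ((20 : Int), "update: " ++ PySem.Str.slice (pvTitleB sig) none (some 35))
       | none => (12, L)) := by
  induction l generalizing L with
  | nil => rfl
  | cons sig l ih =>
    rw [List.foldl_cons]
    by_cases hg : ((PySem.Dict.mk sig).getD "signal_type" "" == "game_update") = true
    · have hs : pvStepA (12, L) sig
          = (20, "update: " ++ PySem.Str.slice (pvTitleB sig) none (some 35)) := by
        simp [pvStepA, hg, pvTitleB]
      rw [hs, pvFold_20]
      simp [pvFindType, hg]
    · have hs : pvStepA (12, L) sig = (12, L) := by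
        simp [pvStepA, hg]
      rw [hs, ih]
      simp [pvFindType, hg]

theorem pvFold_8 (l : List (List (String × String))) (L : String) :
    l.foldl pvStepA (8, L) =
      (match pvFindType l "game_update" with
       | some sig => ((20 : Int), "update: " ++ PySem.Str.slice (pvTitleB sig) none (some 35))
       | none =>
         match pvFindType l "ge_rise" with
         | some sig => (12, "GE rising (" ++ pvTitleB sig ++ ")")
         | none => (8, L)) := by
  induction l generalizing L with
  | nil => rfl
  | cons sig l ih =>
    rw [List.foldl_cons]
    by_cases hg : ((PySem.Dict.mk sig).getD "signal_type" "" == "game_update") = true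
    · have hs : pvStepA (8, L) sig
          = (20, "update: " ++ PySem.Str.slice (pvTitleB sig) none (some 35)) := by
        simp [pvStepA, hg, pvTitleB]
      rw [hs, pvFold_20]
      simp [pvFindType, hg]
    · by_cases he : ((PySem.Dict.mk sig).getD "signal_type" "" == "ge_rise") = true
      · have hs : pvStepA (8, L) sig = (12, "GE rising (" ++ pvTitleB sig ++ ")") := by
          simp [pvStepA, hg, he, pvTitleB]
        rw [hs, pvFold_12]
        simp [pvFindType, hg, he]
      · have hs : pvStepA (8, L) sig = (8, L) := by
          simp [pvStepA, hg, he]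
        rw [hs, ih]
        simp [pvFindType, hg, he]

theorem pvFold_0 (l : List (List (String × String))) :
    l.foldl pvStepA (0, "") =
      (match pvFindType l "game_update" with
       | some sig => ((20 : Int), "update: " ++ PySem.Str.slice (pvTitleB sig) none (some 35))
       | none =>
         match pvFindType l "ge_rise" with
         | some sig => (12, "GE rising (" ++ pvTitleB sig ++ ")")
         | none =>
           match pvFindType l "mentioned" with
           | some sig => (8, "in news: " ++ PySem.Str.slice (pvTitleB sig) none (some 35))
           | none => (0, "")) := by
  induction l with
  | nil => rfl
  | cons sig l ih =>
    rw [List.foldl_cons]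
    by_cases hg : ((PySem.Dict.mk sig).getD "signal_type" "" == "game_update") = true
    · have hs : pvStepA (0, "") sig
          = (20, "update: " ++ PySem.Str.slice (pvTitleB sig) none (some 35)) := by
        simp [pvStepA, hg, pvTitleB]
      rw [hs, pvFold_20]
      simp [pvFindType, hg]
    · by_cases he : ((PySem.Dict.mk sig).getD "signal_type" "" == "ge_rise") = true
      · have hs : pvStepA (0, "") sig = (12, "GE rising (" ++ pvTitleB sig ++ ")") := by
          simp [pvStepA, hg, he, pvTitleB]
        rw [hs, pvFold_12]
        simp [pvFindType, hg, he]
      · by_cases hm : ((PySem.Dict.mk sig).getD "signal_type" "" == "mentioned") = true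
        · have hs : pvStepA (0, "") sig
              = (8, "in news: " ++ PySem.Str.slice (pvTitleB sig) none (some 35)) := by
            simp [pvStepA, hg, he, hm, pvTitleB]
          rw [hs, pvFold_8]
          simp [pvFindType, hg, he, hm]
        · have hs : pvStepA (0, "") sig = (0, "") := by
            simp [pvStepA, hg, he, hm]
          rw [hs, ih]
          simp [pvFindType, hg, he, hm]

-- ===== VERDICT (by name: the statement is the Claim_ definition above) =====
theorem calc_news_boost_py_spec : Claim_equal_calc_news_boost_py := by
  intro signals _ _
  unfold Spec_calc_news_boost_py calc_news_boost_py calc_news_boost_py_alt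
  by_cases h : signals.isEmpty
  · simp [h]
  · simp only [h]
    exact pvFold_0 signals
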